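-- pv_equiv track=rewrite | github.com/Prashant-Aswal/Numbers_and_Bases | Decimal_To_Base_11.py | dectob11
-- ===== SOURCE A (Python) =====
-- def dectob11(num):
--     val = []
--     Q = int(num / 11)
--     M = num % 11
--     val.append(M)
--     while Q > 0:
--         M = Q % 11
--         val.append(M)
--         Q = int(Q / 11)
--     val.reverse()
--     t = 0
--     for i in val:
--         val[t] = str(val[t])
--         if val[t] == '10':
--             val[t] = 'A'
--         t = t + 1
--     n = 0
--     ans = None
--     for i in val:
--         if ans is None:
--             ans = val[n]
--         else:
--             ans = ans + val[n]
--         n = n + 1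
--     return ans
-- ===== SOURCE B (Python) =====
-- def dectob11(num):
--     Q = int(num / 11)
--     M = num % 11
--     d = 'A' if str(M) == '10' else str(M)
--     return dectob11(Q) + d if Q > 0 else d
-- ===== Notes on version B (the rewrite author's own statement) =====
-- stated objective: simpler
-- what changed: Replaces the append-to-list / reverse / in-place stringify / None-seeded concatenation loops with a single recursive function that emits the digits most-significant-first directly (recursion on the truncated quotient instead of iterative list building).
import Mathlib
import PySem

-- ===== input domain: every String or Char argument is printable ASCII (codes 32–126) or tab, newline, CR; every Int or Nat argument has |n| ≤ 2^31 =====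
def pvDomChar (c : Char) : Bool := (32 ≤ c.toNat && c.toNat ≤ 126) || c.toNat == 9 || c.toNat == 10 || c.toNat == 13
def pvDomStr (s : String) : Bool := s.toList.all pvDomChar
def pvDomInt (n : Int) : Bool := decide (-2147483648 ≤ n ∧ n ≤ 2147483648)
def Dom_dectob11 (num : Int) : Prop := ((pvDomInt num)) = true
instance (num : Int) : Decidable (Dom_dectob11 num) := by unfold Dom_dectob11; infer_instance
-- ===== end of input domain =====

-- B replaces A's build-list / reverse / stringify / concatenate loops by one recursion on the
-- truncated quotient that emits the digits most-significant-first directly (objective: simpler).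
-- Both ports totalise their loop/recursion with a fuel counter set to Q.toNat / num.toNat, which
-- always suffices because int(Q / 11) strictly decreases the nonnegative part (pvTdivLt below).

-- ===== PORT A =====
-- the 'while Q > 0' loop: appends Q % 11 and replaces Q by int(Q / 11)
def dectob11Loop (fuel : Nat) (Q : Int) (val : List Int) : List Int :=
  match fuel with
  | 0 => val
  | f + 1 =>
    if 0 < Q then dectob11Loop f (PySem.Int.truncdiv Q 11) (val ++ [PySem.Int.mod Q 11]) else val

def dectob11 (num : Int) : String :=
  let Q := PySem.Int.truncdiv num 11            -- Q = int(num / 11)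
  let M := PySem.Int.mod num 11                 -- M = num % 11
  let val := dectob11Loop Q.toNat Q [M]         -- val = [M]; while loop
  let val2 := val.reverse                       -- val.reverse()
  -- the first for-loop: val[t] = str(val[t]); '10' becomes 'A'
  let strs := val2.map (fun v =>
    if PySem.Int.toStr v = "10" then "A" else PySem.Int.toStr v)
  -- the second for-loop: ans starts as None, then concatenates;
  -- val is never empty, so the None branch ('' default) is unreachable
  (strs.foldl (fun ans s =>
      match ans with
      | none => some s
      | some a => some (a ++ s)) none).getD ""

-- ===== PORT B =====
def dectob11AltGo (fuel : Nat) (num : Int) : String :=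
  let Q := PySem.Int.truncdiv num 11
  let M := PySem.Int.mod num 11
  let d := if PySem.Int.toStr M = "10" then "A" else PySem.Int.toStr M
  match fuel with
  | 0 => d
  | f + 1 => if 0 < Q then dectob11AltGo f Q ++ d else d

def dectob11_alt (num : Int) : String := dectob11AltGo num.toNat num

-- ===== PRECONDITION & SPEC =====
def Spec_dectob11 (num : Int) (out : String) : Prop := out = dectob11_alt num
instance (num : Int) (out : String) : Decidable (Spec_dectob11 num out) := by unfold Spec_dectob11; infer_instance

-- ===== CLAIM (what is proved, stated in full; the proofs are below) =====
def Claim_equal_dectob11 : Prop := ∀ (num : Int), Dom_dectob11 num → Spec_dectob11 num (dectob11 num)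

-- ===== LEMMAS AND PROOFS =====

-- int(n / 11) strictly shrinks the nonnegative part: the fuel counters suffice
theorem pvTdivLt (n : Int) (h : 0 < n) :
    (PySem.Int.truncdiv n 11).toNat < n.toNat := by
  have heq := @Int.tdiv_eq_ediv n 11
  rw [if_pos (Or.inl (le_of_lt h))] at heq
  unfold PySem.Int.truncdiv
  omega

theorem pvTdivNonpos (n : Int) (h : n ≤ 0) : PySem.Int.truncdiv n 11 ≤ 0 := by
  have heq := @Int.tdiv_eq_ediv n 11
  have hs : (11:Int).sign = 1 := rfl
  rw [hs] at heq
  unfold PySem.Int.truncdiv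
  by_cases hc : (0 ≤ n ∨ (11:Int) ∣ n)
  · rw [if_pos hc] at heq; omega
  · rw [if_neg hc] at heq; push Not at hc; omega

theorem pvTdivLt' (n : Int) (h : 0 < PySem.Int.truncdiv n 11) :
    (PySem.Int.truncdiv n 11).toNat < n.toNat := by
  have heq := @Int.tdiv_eq_ediv n 11
  have hs : (11:Int).sign = 1 := rfl
  rw [hs] at heq
  unfold PySem.Int.truncdiv at *
  by_cases hc : (0 ≤ n ∨ (11:Int) ∣ n)
  · rw [if_pos hc] at heq; omega
  · rw [if_neg hc] at heq; push Not at hc; omega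

-- the digit-to-string map both ports use
def pvDigit (v : Int) : String := if PySem.Int.toStr v = "10" then "A" else PySem.Int.toStr v

-- concatenation of a list of strings
def pvRender : List String → String
  | [] => ""
  | s :: r => s ++ pvRender r

theorem pvRender_append (l1 l2 : List String) :
    pvRender (l1 ++ l2) = pvRender l1 ++ pvRender l2 := by
  induction l1 with
  | nil => simp [pvRender]
  | cons s r ih => simp [pvRender, ih, String.append_assoc]

theorem pvFold_some (l : List String) (a : String) :
    l.foldl (fun ans s =>
      match ans with
      | none => some s
      | some b => some (b ++ s)) (some a) = some (a ++ pvRender l) := by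
  induction l generalizing a with
  | nil => simp [pvRender]
  | cons s r ih => simp [List.foldl, ih, pvRender, String.append_assoc]

theorem pvFold_none (l : List String) :
    (l.foldl (fun ans s =>
      match ans with
      | none => some s
      | some b => some (b ++ s)) none).getD "" = pvRender l := by
  cases l with
  | nil => rfl
  | cons s r => simp [List.foldl, pvFold_some, pvRender]

theorem pvLoop_append (fuel : Nat) : ∀ (Q : Int) (val : List Int),
    dectob11Loop fuel Q val = val ++ dectob11Loop fuel Q [] := by
  induction fuel with
  | zero => intro Q val; simp [dectob11Loop]
  | succ f ih =>
    intro Q val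
    by_cases h : 0 < Q
    · simp only [dectob11Loop, if_pos h]
      rw [ih _ (val ++ [PySem.Int.mod Q 11]), ih _ ([] ++ [PySem.Int.mod Q 11])]
      simp
    · simp [dectob11Loop, if_neg h]

theorem pvLoop_stuck (fuel : Nat) (Q : Int) (h : ¬ 0 < Q) :
    dectob11Loop fuel Q [] = [] := by
  cases fuel <;> simp [dectob11Loop, h]

-- the recursion in B is insensitive to any sufficient fuel
theorem pvAltGoFuel (f1 : Nat) : ∀ (f2 : Nat) (Q : Int), Q.toNat ≤ f1 → Q.toNat ≤ f2 →
    dectob11AltGo f1 Q = dectob11AltGo f2 Q := by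
  induction f1 with
  | zero =>
    intro f2 Q h1 _
    have h' : ¬ 0 < PySem.Int.truncdiv Q 11 := by have := pvTdivNonpos Q (by omega); omega
    cases f2 <;> simp [dectob11AltGo, h']
  | succ f ih =>
    intro f2 Q h1 h2
    by_cases h : 0 < Q
    · have hlt := pvTdivLt Q h
      cases f2 with
      | zero => omega
      | succ g =>
        simp only [dectob11AltGo]
        rw [ih g (PySem.Int.truncdiv Q 11) (by omega) (by omega)]
    · have h' : ¬ 0 < PySem.Int.truncdiv Q 11 := by have := pvTdivNonpos Q (by omega); omega
      cases f2 <;> simp [dectob11AltGo, h']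

-- B's recursion computes exactly the rendering of A's reversed digit list
theorem pvKey (fuel : Nat) : ∀ (Q : Int), Q.toNat ≤ fuel →
    (if 0 < Q then dectob11AltGo Q.toNat Q else "") =
      pvRender (((dectob11Loop fuel Q []).reverse).map pvDigit) := by
  induction fuel with
  | zero =>
    intro Q h1
    have h : ¬ 0 < Q := by omega
    simp [dectob11Loop, if_neg h, pvRender]
  | succ f ih =>
    intro Q h1
    by_cases h : 0 < Q
    · have hlt := pvTdivLt Q h
      obtain ⟨k, hk⟩ : ∃ k, Q.toNat = k + 1 := ⟨Q.toNat - 1, by omega⟩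
      rw [if_pos h, hk]
      simp only [dectob11AltGo, dectob11Loop, if_pos h]
      rw [pvAltGoFuel k (PySem.Int.truncdiv Q 11).toNat (PySem.Int.truncdiv Q 11)
            (by omega) (le_refl _),
          pvLoop_append f _ ([] ++ [PySem.Int.mod Q 11])]
      simp only [List.nil_append, List.singleton_append, List.reverse_cons, List.map_append]
      rw [pvRender_append, ← ih (PySem.Int.truncdiv Q 11) (by omega)]
      by_cases h2 : 0 < PySem.Int.truncdiv Q 11
      · simp [if_pos h2, pvRender, pvDigit]
      · simp [if_neg h2, pvRender, pvDigit]
    · rw [if_neg h, pvLoop_stuck _ _ h]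
      simp [pvRender]

-- ===== VERDICT (by name: the statement is the Claim_ definition above) =====
theorem dectob11_spec : Claim_equal_dectob11 := by
  intro num _
  unfold Spec_dectob11 dectob11 dectob11_alt
  dsimp only
  rw [show (fun v => if PySem.Int.toStr v = "10" then "A" else PySem.Int.toStr v) = pvDigit from rfl]
  rw [pvLoop_append _ _ [PySem.Int.mod num 11]]
  simp only [List.singleton_append, List.reverse_cons, List.map_append]
  rw [pvFold_none, pvRender_append,
      ← pvKey (PySem.Int.truncdiv num 11).toNat (PySem.Int.truncdiv num 11) (le_refl _)]
  by_cases h : 0 < PySem.Int.truncdiv num 11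
  · rw [if_pos h]
    obtain ⟨k, hk⟩ : ∃ k, num.toNat = k + 1 := ⟨num.toNat - 1, by have := pvTdivLt' num h; omega⟩
    rw [hk]
    simp only [dectob11AltGo, if_pos h]
    rw [pvAltGoFuel k (PySem.Int.truncdiv num 11).toNat (PySem.Int.truncdiv num 11)
          (by have := pvTdivLt' num h; omega) (le_refl _)]
    simp [pvRender, pvDigit]
  · rw [if_neg h]
    cases hn : num.toNat <;> simp [dectob11AltGo, h, pvRender, pvDigit]
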